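-- pv_equiv track=rewrite | github.com/ivanillera/TP1Sintaxis | Lexer.py | a_different
-- ===== SOURCE A (Python) =====
-- TRAMPA = -1
--
-- RESULTADO_ACEPTADO = "ACEPTADO"
--
-- RESULTADO_TRAMPA = "TRAMPA"
--
-- RESULTADO_NO_ACEPTADO = "NO_ACEPTADO"
--
-- def d_different(estado_anterior, caracter):
-- 	if estado_anterior == 0 and caracter == "!":
-- 		return 1
-- 	if estado_anterior == 1 and caracter == "=":
-- 		return 2
-- 	return RESULTADO_TRAMPA
--
-- def a_different(cadena):
-- 	Finales = [2]
-- 	estado_actual = 0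
--
-- 	for caracter in cadena:
-- 		estado_proximo = d_different(estado_actual, caracter)
-- 		if estado_proximo == TRAMPA:
-- 			return RESULTADO_TRAMPA
-- 		estado_actual = estado_proximo
--
-- 	if estado_actual in Finales:
-- 		return RESULTADO_ACEPTADO
-- 	else:
-- 		return RESULTADO_NO_ACEPTADO
-- ===== SOURCE B (Python) =====
-- RESULTADO_ACEPTADO = "ACEPTADO"
-- RESULTADO_NO_ACEPTADO = "NO_ACEPTADO"
--
-- def a_different(cadena):
--     # A's "TRAMPA" branch is dead (string compared with int -1), so A accepts
--     # exactly the character sequence ['!', '='] and rejects everything else.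
--     return RESULTADO_ACEPTADO if list(cadena) == ['!', '='] else RESULTADO_NO_ACEPTADO
-- ===== Notes on version B (the rewrite author's own statement) =====
-- stated objective: simpler
-- what changed: The DFA state-machine loop (with its dead int-vs-string TRAMPA branch) is replaced by a single closed-form comparison of the character sequence against ['!', '=']; the per-character interpreted loop disappears into one C-level list comparison.
import Mathlib
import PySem

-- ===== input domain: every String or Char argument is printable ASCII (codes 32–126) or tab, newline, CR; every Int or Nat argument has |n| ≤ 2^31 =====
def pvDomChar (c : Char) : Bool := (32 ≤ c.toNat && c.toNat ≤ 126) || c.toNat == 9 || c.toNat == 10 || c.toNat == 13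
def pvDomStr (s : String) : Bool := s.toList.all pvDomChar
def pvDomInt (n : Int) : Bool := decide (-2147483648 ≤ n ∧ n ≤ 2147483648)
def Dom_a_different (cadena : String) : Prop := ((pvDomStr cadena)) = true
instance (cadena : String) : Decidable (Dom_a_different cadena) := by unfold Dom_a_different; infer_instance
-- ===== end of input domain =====

-- B replaces A's DFA loop (whose "TRAMPA" early return is dead code: a string
-- compared against the int -1) by one closed-form comparison of the character
-- list with ['!', '=']; objective: simpler.


-- ===== PORT A =====
-- Python's estado can be an int (0,1,2) or the string "TRAMPA": modelled as Int ⊕ String.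
def d_different (estado_anterior : Int ⊕ String) (caracter : Char) : Int ⊕ String :=
  if estado_anterior = Sum.inl 0 ∧ caracter = '!' then Sum.inl 1
  else if estado_anterior = Sum.inl 1 ∧ caracter = '=' then Sum.inl 2
  else Sum.inr "TRAMPA"

-- loop state: none = early `return RESULTADO_TRAMPA` taken (never happens: the
-- trap value is the string "TRAMPA", compared against int -1)
def aDiffStep (st : Option (Int ⊕ String)) (c : Char) : Option (Int ⊕ String) :=
  match st with
  | none => none
  | some est =>
      let nxt := d_different est c
      if nxt = Sum.inl (-1) then none else some nxt

def a_different (cadena : String) : String :=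
  match cadena.toList.foldl aDiffStep (some (Sum.inl 0)) with
  | none => "TRAMPA"
  | some est => if est = Sum.inl 2 then "ACEPTADO" else "NO_ACEPTADO"

-- ===== PORT B =====
def a_different_alt (cadena : String) : String :=
  if cadena.toList = ['!', '='] then "ACEPTADO" else "NO_ACEPTADO"

-- ===== PRECONDITION & SPEC =====
def Spec_a_different (cadena : String) (out : String) : Prop := out = a_different_alt cadena
instance (cadena : String) (out : String) : Decidable (Spec_a_different cadena out) := by unfold Spec_a_different; infer_instance

-- ===== CLAIM (what is proved, stated in full; the proofs are below) =====
def Claim_equal_a_different : Prop := ∀ (cadena : String), Dom_a_different cadena → Spec_a_different cadena (a_different cadena)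

-- ===== LEMMAS AND PROOFS =====
-- the trap state is absorbing
lemma trap_stays (l : List Char) :
    l.foldl aDiffStep (some (Sum.inr "TRAMPA")) = some (Sum.inr "TRAMPA") := by
  induction l with
  | nil => rfl
  | cons c t ih =>
      simp only [List.foldl_cons]
      have h : aDiffStep (some (Sum.inr "TRAMPA")) c = some (Sum.inr "TRAMPA") := by
        simp [aDiffStep, d_different]
      rw [h, ih]

lemma step_from0 (c : Char) :
    aDiffStep (some (Sum.inl 0)) c
      = (if c = '!' then some (Sum.inl 1) else some (Sum.inr "TRAMPA")) := by
  by_cases h : c = '!' <;> simp [aDiffStep, d_different, h]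

lemma step_from1 (c : Char) :
    aDiffStep (some (Sum.inl 1)) c
      = (if c = '=' then some (Sum.inl 2) else some (Sum.inr "TRAMPA")) := by
  by_cases h : c = '=' <;> simp [aDiffStep, d_different, h]

lemma step_from2 (c : Char) :
    aDiffStep (some (Sum.inl 2)) c = some (Sum.inr "TRAMPA") := by
  simp [aDiffStep, d_different]

lemma trap_step (c : Char) :
    aDiffStep (some (Sum.inr "TRAMPA")) c = some (Sum.inr "TRAMPA") := by
  simp [aDiffStep, d_different]

lemma main_lemma (l : List Char) :
    (match l.foldl aDiffStep (some (Sum.inl 0)) with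
      | none => "TRAMPA"
      | some est => if est = Sum.inl 2 then "ACEPTADO" else "NO_ACEPTADO")
    = (if l = ['!', '='] then "ACEPTADO" else "NO_ACEPTADO") := by
  match l with
  | [] => decide
  | [c] =>
      simp only [List.foldl_cons, List.foldl_nil, step_from0]
      by_cases h : c = '!' <;> simp [h]
  | c1 :: c2 :: rest =>
      by_cases h1 : c1 = '!'
      · by_cases h2 : c2 = '='
        · subst h1; subst h2
          have e1 : aDiffStep (some (Sum.inl 0)) '!' = some (Sum.inl 1) := by decide
          have e2 : aDiffStep (some (Sum.inl 1)) '=' = some (Sum.inl 2) := by decide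
          match rest with
          | [] => simp only [List.foldl_cons, List.foldl_nil, e1, e2]
          | c3 :: t =>
              simp only [List.foldl_cons, e1, e2, step_from2, trap_stays]
              simp
        · subst h1
          have e1 : aDiffStep (some (Sum.inl 0)) '!' = some (Sum.inl 1) := by decide
          simp only [List.foldl_cons, e1, step_from1, if_neg h2, trap_stays]
          simp [h2]
      · simp only [List.foldl_cons, step_from0, if_neg h1, trap_step, trap_stays]
        simp [h1]

-- ===== VERDICT (by name: the statement is the Claim_ definition above) =====
theorem a_different_spec : Claim_equal_a_different := by
  intro cadena _
  unfold Spec_a_different a_different a_different_alt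
  exact main_lemma cadena.toList
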